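-- pv_equiv track=rewrite | github.com/luodi-7/meme | meme/generate/pause/add_user_input_all.py | assign_pause_tokens_to_keys
-- ===== SOURCE A (Python) =====
-- def assign_pause_tokens_to_keys(keys, pause_token_count):
--     """
--     为每个键预分配一组pause token
--     :param keys: 需要分配pause token的键列表
--     :param pause_token_count: 每个键分配几个pause token
--     :return: 一个字典，键为user_input的键，值为对应的pause token列表
--     """
--     pause_token_map = {}
--     pause_counter = 0
--     for key in keys:
--         pause_tokens = [f"<pause_{pause_counter + j}>" for j in range(pause_token_count)]
--         pause_token_map[key] = " ".join(pause_tokens)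
--         pause_counter += pause_token_count
--     return pause_token_map
-- ===== SOURCE B (Python) =====
-- def assign_pause_tokens_to_keys(keys, pause_token_count):
--     # Phase 1: materialize the complete flat token list in global order.
--     tokens = [f"<pause_{t}>" for t in range(len(keys) * pause_token_count)]
--     # Phase 2: each key at index i takes the i-th chunk of that list.
--     result = {}
--     for i, key in enumerate(keys):
--         result[key] = " ".join(tokens[i * pause_token_count:(i + 1) * pause_token_count])
--     return result
-- ===== Notes on version B (the rewrite author's own statement) =====
-- stated objective: alternative
-- what changed: Replaced A's threaded pause-counter accumulator with a two-phase build: first materialize the complete flat token list in global order, then assign each key at index i the slice [i*count:(i+1)*count] joined by spaces, building the dict over enumerate(keys).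
import Mathlib
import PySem

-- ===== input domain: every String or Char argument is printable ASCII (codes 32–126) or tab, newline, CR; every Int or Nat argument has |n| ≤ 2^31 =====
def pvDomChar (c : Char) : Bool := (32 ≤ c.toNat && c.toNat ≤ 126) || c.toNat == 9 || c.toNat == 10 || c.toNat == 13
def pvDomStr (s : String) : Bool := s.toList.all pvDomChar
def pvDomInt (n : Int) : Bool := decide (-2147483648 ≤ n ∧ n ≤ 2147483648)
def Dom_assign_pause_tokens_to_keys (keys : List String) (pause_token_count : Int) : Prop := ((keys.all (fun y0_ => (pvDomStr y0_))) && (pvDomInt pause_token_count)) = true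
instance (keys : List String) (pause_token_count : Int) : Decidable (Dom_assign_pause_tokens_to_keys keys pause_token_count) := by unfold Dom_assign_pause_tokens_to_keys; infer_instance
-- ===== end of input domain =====

-- B replaces A's threaded pause counter with a two-phase build (materialize the full flat
-- token list, then give key i the i-th chunk slice); objective: alternative decomposition.

-- the f-string f"<pause_{n}>" (used by both programs)
def pvTok (n : Int) : String := String.ofList ("<pause_".toList ++ PySem.Int.toChars n ++ ['>'])

-- ===== PORT A =====
def assign_pause_tokens_to_keys (keys : List String) (pause_token_count : Int) : List (String × String) :=
  (keys.foldl
    (fun (st : PySem.Dict String String × Int) key =>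
      let pause_tokens := (PySem.List.pyRange 0 pause_token_count 1).map (fun j => pvTok (st.2 + j))
      (st.1.insert key (PySem.Str.join " " pause_tokens), st.2 + pause_token_count))
    (PySem.Dict.empty, 0)).1.items

-- ===== PORT B =====
def assign_pause_tokens_to_keys_alt (keys : List String) (pause_token_count : Int) : List (String × String) :=
  let tokens := (PySem.List.pyRange 0 ((keys.length : Int) * pause_token_count) 1).map pvTok
  ((PySem.List.enumerate keys 0).foldl
    (fun (d : PySem.Dict String String) p =>
      d.insert p.2 (PySem.Str.join " "
        (PySem.List.slice tokens (some (p.1 * pause_token_count)) (some ((p.1 + 1) * pause_token_count)))))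
    PySem.Dict.empty).items

-- ===== PRECONDITION & SPEC =====
def Spec_assign_pause_tokens_to_keys (keys : List String) (pause_token_count : Int) (out : List (String × String)) : Prop := out = assign_pause_tokens_to_keys_alt keys pause_token_count
instance (keys : List String) (pause_token_count : Int) (out : List (String × String)) : Decidable (Spec_assign_pause_tokens_to_keys keys pause_token_count out) := by unfold Spec_assign_pause_tokens_to_keys; infer_instance

-- ===== CLAIM (what is proved, stated in full; the proofs are below) =====
def Claim_equal_assign_pause_tokens_to_keys : Prop := ∀ (keys : List String) (pause_token_count : Int), Dom_assign_pause_tokens_to_keys keys pause_token_count → Spec_assign_pause_tokens_to_keys keys pause_token_count (assign_pause_tokens_to_keys keys pause_token_count)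

-- ===== LEMMAS AND PROOFS =====

-- shifting a 0-based range into the token index space
theorem pv_shift (s c : Int) :
    (PySem.List.pyRange 0 c 1).map (fun j => pvTok (s + j))
      = (PySem.List.pyRange s (s + c) 1).map pvTok := by
  rw [PySem.List.pyRange_one, PySem.List.pyRange_one]
  simp [Function.comp_def]

-- the i-th chunk slice of the flat token list is exactly A's i-th token block
theorem pv_chunk (n i : Nat) (c : Int) (hin : i + 1 ≤ n) :
    PySem.List.slice ((PySem.List.pyRange 0 ((n : Int) * c) 1).map pvTok)
        (some ((i : Int) * c)) (some (((i : Int) + 1) * c))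
      = (PySem.List.pyRange ((i : Int) * c) (((i : Int) + 1) * c) 1).map pvTok := by
  by_cases hc : c ≤ 0
  case pos =>
    have h1 : ((n : Int) * c) ≤ 0 := mul_nonpos_of_nonneg_of_nonpos (by positivity) hc
    have h2 : ((i : Int) + 1) * c ≤ (i : Int) * c := by nlinarith
    rw [PySem.List.pyRange_one_eq_nil h1, PySem.List.pyRange_one_eq_nil h2]
    simp [PySem.List.slice]
  case neg =>
    rw [not_le] at hc
    have ha : (0 : Int) ≤ (i : Int) * c := by positivity
    have hb : (0 : Int) ≤ ((i : Int) + 1) * c := by positivity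
    have hab : (i : Int) * c ≤ ((i : Int) + 1) * c := by nlinarith
    have hbn : ((i : Int) + 1) * c ≤ (n : Int) * c := by
      have : ((i : Int) + 1) ≤ (n : Int) := by exact_mod_cast hin
      nlinarith
    rw [PySem.List.slice_toNat _ ha hb]
    rw [PySem.List.pyRange_one_append 0 ((i : Int) * c) ((n : Int) * c) ha (le_trans hab hbn),
        PySem.List.pyRange_one_append ((i : Int) * c) (((i : Int) + 1) * c) ((n : Int) * c) hab hbn]
    rw [List.map_append, List.map_append]
    have hlen1 : ((PySem.List.pyRange 0 ((i : Int) * c) 1).map pvTok).length = ((i : Int) * c).toNat := by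
      simp [PySem.List.length_pyRange_one]
    have hlen2 : ((PySem.List.pyRange ((i : Int) * c) (((i : Int) + 1) * c) 1).map pvTok).length
        = (((i : Int) + 1) * c).toNat - ((i : Int) * c).toNat := by
      simp [PySem.List.length_pyRange_one]
      omega
    rw [← hlen1, List.drop_left, hlen1, ← hlen2, List.take_left]

-- the loop invariant: A's fold with counter i*c equals B's fold over enumerate from i
theorem pv_loop (rest : List String) (c : Int) (n : Nat) :
    ∀ (i : Nat) (d : PySem.Dict String String), i + rest.length = n →
    (rest.foldl
      (fun (st : PySem.Dict String String × Int) key =>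
        ((st.1.insert key (PySem.Str.join " "
            ((PySem.List.pyRange 0 c 1).map (fun j => pvTok (st.2 + j))))), st.2 + c))
      (d, (i : Int) * c)).1
    = (PySem.List.enumerate rest (i : Int)).foldl
        (fun (d : PySem.Dict String String) p =>
          d.insert p.2 (PySem.Str.join " "
            (PySem.List.slice ((PySem.List.pyRange 0 ((n : Int) * c) 1).map pvTok)
              (some (p.1 * c)) (some ((p.1 + 1) * c)))))
        d := by
  induction rest with
  | nil => intro i d _; simp [PySem.List.enumerate_nil]
  | cons x xs ih =>
    intro i d hn
    rw [PySem.List.enumerate_cons]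
    simp only [List.foldl_cons]
    have hin : i + 1 ≤ n := by simp at hn; omega
    rw [pv_shift ((i : Int) * c) c]
    have harith : (i : Int) * c + c = ((i : Int) + 1) * c := by ring
    rw [harith, ← pv_chunk n i c hin]
    have hstep : ((i : Int) + 1) * c = ((i + 1 : Nat) : Int) * c := by push_cast; ring
    have hstart : (i : Int) + 1 = ((i + 1 : Nat) : Int) := by push_cast; ring
    rw [hstep, hstart, ih (i + 1) _ (by simp at hn ⊢; omega)]

-- ===== VERDICT (by name: the statement is the Claim_ definition above) =====
theorem assign_pause_tokens_to_keys_spec : Claim_equal_assign_pause_tokens_to_keys := by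
  intro keys c _
  unfold Spec_assign_pause_tokens_to_keys assign_pause_tokens_to_keys assign_pause_tokens_to_keys_alt
  have h := pv_loop keys c keys.length 0 PySem.Dict.empty (by simp)
  simp only [Nat.cast_zero, zero_mul] at h
  rw [h]
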